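-- pv_equiv track=rewrite | github.com/AakashMalhotra22/Overall-python | 200_creating_list_function.py | count
-- ===== SOURCE A (Python) =====
-- def count(lst1):
--     llt5 = 0
--     lgte5 = 0
--     for i in lst1:
--         if len(i)<5:
--             llt5+=1
--         else:
--             lgte5+=1
--     return llt5, lgte5
-- ===== SOURCE B (Python) =====
-- def count(lst1):
--     # Sort the lengths, then binary-search the boundary between <5 and >=5.
--     lens = sorted(len(i) for i in lst1)
--     lo, hi = 0, len(lens)
--     while lo < hi:
--         mid = (lo + hi) // 2
--         if lens[mid] < 5:
--             lo = mid + 1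
--         else:
--             hi = mid
--     return lo, len(lens) - lo
-- ===== Notes on version B (the rewrite author's own statement) =====
-- stated objective: alternative
-- what changed: B sorts the string lengths and locates the short/long boundary with a hand-written binary search (partition point), returning (boundary, n - boundary), instead of accumulating two counters in a single pass.
import Mathlib
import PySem

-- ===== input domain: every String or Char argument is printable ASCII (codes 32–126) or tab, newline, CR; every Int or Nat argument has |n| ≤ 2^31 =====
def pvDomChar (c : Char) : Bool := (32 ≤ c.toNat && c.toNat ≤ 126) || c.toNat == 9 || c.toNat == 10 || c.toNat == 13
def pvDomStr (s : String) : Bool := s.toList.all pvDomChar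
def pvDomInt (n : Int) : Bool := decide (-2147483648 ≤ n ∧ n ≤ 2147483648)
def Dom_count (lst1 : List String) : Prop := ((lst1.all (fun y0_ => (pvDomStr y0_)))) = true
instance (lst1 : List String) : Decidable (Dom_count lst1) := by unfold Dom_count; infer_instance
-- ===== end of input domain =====

-- B sorts the lengths and finds the short/long boundary by binary search instead of keeping two running counters (alternative algorithm).

-- ===== PORT A =====
def count (lst1 : List String) : Int × Int :=
  lst1.foldl (fun (st : Int × Int) i =>
    if (PySem.Str.len i) < 5 then (st.1 + 1, st.2) else (st.1, st.2 + 1)) (0, 0)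

-- ===== PORT B =====
-- the while loop of Source B; lo/hi are Nat since they are list indices ≥ 0 throughout.
-- lens[mid] is in range whenever lo < hi ≤ len, so pyGetD with default 0 is exact here.
def bsearch5 (lens : List Int) (lo hi : Nat) : Nat :=
  if h : lo < hi then
    let mid := (lo + hi) / 2
    if PySem.List.pyGetD lens (mid : Int) 0 < 5 then bsearch5 lens (mid + 1) hi
    else bsearch5 lens lo mid
  else lo
termination_by hi - lo
decreasing_by all_goals omega

def count_alt (lst1 : List String) : Int × Int :=
  let lens := PySem.List.sorted (lst1.map (fun i => PySem.Str.len i)) (fun x => x) false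
  let lo := bsearch5 lens 0 lens.length
  ((lo : Int), (lens.length : Int) - (lo : Int))

-- ===== PRECONDITION & SPEC =====
def Spec_count (lst1 : List String) (out : Int × Int) : Prop := out = count_alt lst1
instance (lst1 : List String) (out : Int × Int) : Decidable (Spec_count lst1 out) := by unfold Spec_count; infer_instance

-- ===== CLAIM (what is proved, stated in full; the proofs are below) =====
def Claim_equal_count : Prop := ∀ (lst1 : List String), Dom_count lst1 → Spec_count lst1 (count lst1)

-- ===== LEMMAS AND PROOFS =====

-- A's two-counter loop computes (countP (len < 5), length - countP (len < 5)).
lemma count_loop (lst1 : List String) (a b : Int) :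
    lst1.foldl (fun (st : Int × Int) i =>
      if (PySem.Str.len i) < 5 then (st.1 + 1, st.2) else (st.1, st.2 + 1)) (a, b)
    = (a + (lst1.countP (fun i => decide (PySem.Str.len i < 5)) : Int),
       b + ((lst1.length : Int) - (lst1.countP (fun i => decide (PySem.Str.len i < 5)) : Int))) := by
  induction lst1 generalizing a b with
  | nil => simp
  | cons h t ih =>
    rw [List.foldl_cons]
    by_cases hc : PySem.Str.len h < 5
    · rw [if_pos hc, ih]
      have hb : (decide (PySem.Str.len h < 5)) = true := decide_eq_true hc
      simp only [List.countP_cons, hb, if_true, List.length_cons, Prod.mk.injEq]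
      constructor <;> push_cast <;> ring
    · rw [if_neg hc, ih]
      have hb : (decide (PySem.Str.len h < 5)) = false := decide_eq_false hc
      simp only [List.countP_cons, hb, List.length_cons, Prod.mk.injEq]
      constructor <;> push_cast <;> ring

-- On a sorted list, "element at i is < 5" is exactly "i is left of the partition point".
lemma sorted_lt5_iff (lens : List Int) (hm : lens.Pairwise (· ≤ ·)) (i : Nat)
    (hi : i < lens.length) :
    lens.getD i 0 < 5 ↔ i < lens.countP (fun x => decide (x < 5)) := by
  have hget : ∀ p q, p < lens.length → q < lens.length → p ≤ q →
      lens.getD p 0 ≤ lens.getD q 0 := by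
    intro p q hp hq hpq
    rw [List.getD_eq_getElem lens 0 hp, List.getD_eq_getElem lens 0 hq]
    rcases Nat.lt_or_eq_of_le hpq with h | h
    · exact (List.pairwise_iff_getElem.mp hm) p q hp hq h
    · subst h; exact le_refl _
  constructor
  · intro hlt
    have htake : (lens.take (i + 1)).countP (fun x => decide (x < 5))
        = (lens.take (i + 1)).length := by
      rw [List.countP_eq_length]
      intro a ha
      obtain ⟨p, hp, hpa⟩ := List.mem_iff_getElem.mp ha
      have hlt1 : p < i + 1 := by rw [List.length_take] at hp; omega
      have hplen : p < lens.length := by rw [List.length_take] at hp; omega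
      have hap : a = lens.getD p 0 := by
        rw [List.getD_eq_getElem lens 0 hplen, ← hpa, List.getElem_take]
      have hmono := hget p i hplen hi (by omega)
      rw [decide_eq_true_iff, hap]
      omega
    have hsplit : lens.countP (fun x => decide (x < 5))
        = (lens.take (i + 1)).countP (fun x => decide (x < 5))
          + (lens.drop (i + 1)).countP (fun x => decide (x < 5)) := by
      rw [← List.countP_append, List.take_append_drop]
    have hlen1 : (lens.take (i + 1)).length = i + 1 := by rw [List.length_take]; omega
    omega
  · intro hc
    by_contra hge
    have hge' : 5 ≤ lens.getD i 0 := by omega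
    have hdrop : (lens.drop i).countP (fun x => decide (x < 5)) = 0 := by
      rw [List.countP_eq_zero]
      intro a ha
      obtain ⟨p, hp, hpa⟩ := List.mem_iff_getElem.mp ha
      have hplen : i + p < lens.length := by rw [List.length_drop] at hp; omega
      have hap : a = lens.getD (i + p) 0 := by
        rw [List.getD_eq_getElem lens 0 hplen, ← hpa, List.getElem_drop]
      have hmono := hget i (i + p) hi hplen (by omega)
      rw [decide_eq_true_iff, hap]
      omega
    have hsplit : lens.countP (fun x => decide (x < 5))
        = (lens.take i).countP (fun x => decide (x < 5))
          + (lens.drop i).countP (fun x => decide (x < 5)) := by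
      rw [← List.countP_append, List.take_append_drop]
    have h1 : (lens.take i).countP (fun x => decide (x < 5)) ≤ (lens.take i).length :=
      List.countP_le_length
    have h2 : (lens.take i).length ≤ i := by rw [List.length_take]; omega
    omega

-- The binary search returns the partition point.
lemma bsearch5_eq (lens : List Int) (hm : lens.Pairwise (· ≤ ·)) :
    ∀ (n lo hi : Nat), hi - lo ≤ n →
    lo ≤ lens.countP (fun x => decide (x < 5)) →
    lens.countP (fun x => decide (x < 5)) ≤ hi → hi ≤ lens.length →
    bsearch5 lens lo hi = lens.countP (fun x => decide (x < 5)) := by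
  intro n
  induction n with
  | zero =>
    intro lo hi hfuel h1 h2 _
    rw [bsearch5]
    have : ¬ lo < hi := by omega
    rw [dif_neg this]; omega
  | succ n ih =>
    intro lo hi hfuel h1 h2 hlen
    rw [bsearch5]
    by_cases hlh : lo < hi
    · rw [dif_pos hlh]
      set mid := (lo + hi) / 2 with hmid
      have hmlt : mid < lens.length := by omega
      have hiff := sorted_lt5_iff lens hm mid hmlt
      have hgd : PySem.List.pyGetD lens (mid : Int) 0 = lens.getD mid 0 :=
        PySem.List.pyGetD_natCast lens mid 0
      by_cases hc : PySem.List.pyGetD lens (mid : Int) 0 < 5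
      · rw [if_pos hc]
        have : mid < lens.countP (fun x => decide (x < 5)) := hiff.mp (by rw [← hgd]; exact hc)
        exact ih (mid + 1) hi (by omega) (by omega) h2 hlen
      · rw [if_neg hc]
        have : ¬ mid < lens.countP (fun x => decide (x < 5)) := fun h => hc (by rw [hgd]; exact hiff.mpr h)
        exact ih lo mid (by omega) h1 (by omega) (by omega)
    · rw [dif_neg hlh]; omega

-- ===== VERDICT (by name: the statement is the Claim_ definition above) =====
theorem count_spec : Claim_equal_count := by
  intro lst1 _
  unfold Spec_count count count_alt
  rw [count_loop]
  set L := PySem.List.sorted (lst1.map (fun i => PySem.Str.len i)) (fun x => x) false with hL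
  show _ = ((bsearch5 L 0 L.length : Int), ((L.length : Int) - (bsearch5 L 0 L.length : Int)))
  have hperm : L.Perm (lst1.map fun i => PySem.Str.len i) := PySem.List.sorted_perm _ _ _
  have hcount : L.countP (fun x => decide (x < 5))
      = lst1.countP (fun i => decide (PySem.Str.len i < 5)) := by
    rw [hperm.countP_eq, List.countP_map]; rfl
  have hlen : L.length = lst1.length := by rw [hperm.length_eq, List.length_map]
  have hm : L.Pairwise (· ≤ ·) := by
    simpa using PySem.List.sorted_pairwise (lst1.map fun i => PySem.Str.len i) (fun x => x)
  have hbs : bsearch5 L 0 L.length = L.countP (fun x => decide (x < 5)) :=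
    bsearch5_eq L hm L.length 0 L.length (by omega) (Nat.zero_le _)
      List.countP_le_length (le_refl _)
  rw [hbs, hcount, hlen]
  simp
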